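-- pv_equiv track=rewrite | github.com/KHP-Informatics/fs2 | medgpt/tokenizers/utils.py | partial_pack_for_risk
-- ===== SOURCE A (Python) =====
-- def partial_pack_for_risk(examples, max_len):
--     result = {k:[] for k in examples.keys()}
--     _key = list(examples.keys())[0] # Take whichever key
--     new_example = {k:[] for k in examples.keys()}
--
--     for ind in range(len(examples[_key])):
--         # Trim long sequences to max_len, from the right side (ie remove left side tokens)
--         example = {k:v[ind][-max_len:] for k,v in examples.items()}
--         if len(new_example[_key]) + len(example[_key]) > max_len:
--             result = {k:result[k] + [v] for k,v in new_example.items()}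
--             new_example = example
--         else:
--             new_example = {k:new_example[k] + v for k,v in example.items()}
--     #  Add the last example if there is something to add
--     if len(new_example[_key]) > 0:
--         result = {k:result[k] + [v] for k,v in new_example.items()}
--
--     return result
-- ===== SOURCE B (Python) =====
-- def partial_pack_for_risk(examples, max_len):
--     # Phase 1: greedy grouping pass over the first key's trimmed lengths only.
--     first = next(iter(examples.values()))
--     bins = []
--     cur = []
--     cur_len = 0
--     for i, seq in enumerate(first):
--         t = len(seq[-max_len:])
--         if cur_len + t > max_len:
--             bins.append(cur)
--             cur = [i]
--             cur_len = t
--         else: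
--             cur.append(i)
--             cur_len += t
--     if cur_len > 0:
--         bins.append(cur)
--     # Phase 2: per key, concatenate that key's trimmed slices over each bin.
--     return {k: [[x for i in b for x in v[i][-max_len:]] for b in bins]
--             for k, v in examples.items()}
-- ===== Notes on version B (the rewrite author's own statement) =====
-- stated objective: alternative
-- what changed: B splits A's single loop over per-index dict rebuilding into two phases: a grouping pass over only the first key's trimmed lengths that greedily assigns indices to bins, then a per-key assembly that concatenates each key's trimmed slices over each bin.
import Mathlib
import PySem

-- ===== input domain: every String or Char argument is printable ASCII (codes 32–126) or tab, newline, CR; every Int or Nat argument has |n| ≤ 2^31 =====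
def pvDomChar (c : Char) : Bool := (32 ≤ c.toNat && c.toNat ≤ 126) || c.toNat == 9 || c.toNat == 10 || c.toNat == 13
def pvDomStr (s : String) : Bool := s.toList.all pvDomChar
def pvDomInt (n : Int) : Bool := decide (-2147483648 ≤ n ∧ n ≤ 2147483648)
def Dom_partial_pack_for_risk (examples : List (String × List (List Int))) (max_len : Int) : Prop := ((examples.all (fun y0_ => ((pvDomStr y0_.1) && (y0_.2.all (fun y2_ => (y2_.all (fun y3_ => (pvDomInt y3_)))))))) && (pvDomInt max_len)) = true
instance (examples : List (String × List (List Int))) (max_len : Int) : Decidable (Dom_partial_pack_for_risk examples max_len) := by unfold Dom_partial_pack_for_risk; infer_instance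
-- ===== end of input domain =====

-- B repacks in two phases — a grouping pass over the first key's trimmed lengths producing index bins, then a per-key assembly of the bins — instead of A's per-index rebuilding of whole dicts (objective: alternative decomposition). Equivalence is proved on non-empty duplicate-free dicts whose value lists are long enough (Pre_ below).


-- ===== PORT A =====
-- v[ind][-max_len:]  (an out-of-range ind — Python IndexError — is excluded by Pre_)
def pvTrimA (max_len : Int) (v : List (List Int)) (ind : Int) : List Int :=
  PySem.List.slice ((PySem.List.pyGet? v ind).getD []) (some (-max_len)) none

def partial_pack_for_risk (examples : List (String × List (List Int))) (max_len : Int) : List (String × List (List Int)) :=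
  let result0 := examples.map (fun kv => (kv.1, ([] : List (List Int))))
  let _key := (examples.map Prod.fst).headD ""
  let new0 := examples.map (fun kv => (kv.1, ([] : List Int)))
  let st := (PySem.List.pyRange 0 ((PySem.Dict.getD ⟨examples⟩ _key []).length : Int) 1).foldl
    (fun st ind =>
      let ex := examples.map (fun kv => (kv.1, pvTrimA max_len kv.2 ind))
      if ((PySem.Dict.getD ⟨st.2⟩ _key []).length : Int) + ((PySem.Dict.getD ⟨ex⟩ _key []).length : Int) > max_len then
        (st.2.map (fun kv => (kv.1, (PySem.Dict.getD ⟨st.1⟩ kv.1 []) ++ [kv.2])), ex)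
      else
        (st.1, ex.map (fun kv => (kv.1, (PySem.Dict.getD ⟨st.2⟩ kv.1 []) ++ kv.2))))
    (result0, new0)
  if ((PySem.Dict.getD ⟨st.2⟩ _key []).length : Int) > 0 then
    st.2.map (fun kv => (kv.1, (PySem.Dict.getD ⟨st.1⟩ kv.1 []) ++ [kv.2]))
  else st.1

-- ===== PORT B =====
-- seq[-max_len:]
def pvTrimB (max_len : Int) (seq : List Int) : List Int :=
  PySem.List.slice seq (some (-max_len)) none

def partial_pack_for_risk_alt (examples : List (String × List (List Int))) (max_len : Int) : List (String × List (List Int)) :=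
  let first := (examples.headD ("", [])).2
  let st := (PySem.List.enumerate first).foldl
    (fun (st : List (List Int) × List Int × Int) p =>
      if st.2.2 + ((pvTrimB max_len p.2).length : Int) > max_len then
        (st.1 ++ [st.2.1], [p.1], ((pvTrimB max_len p.2).length : Int))
      else (st.1, st.2.1 ++ [p.1], st.2.2 + ((pvTrimB max_len p.2).length : Int)))
    ([], [], 0)
  let bins := if st.2.2 > 0 then st.1 ++ [st.2.1] else st.1
  examples.map (fun kv => (kv.1,
    bins.map (fun b => (b.map (fun i => pvTrimB max_len ((PySem.List.pyGet? kv.2 i).getD []))).flatten)))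

-- ===== PRECONDITION & SPEC =====
-- Pre_ excludes inputs where Python A raises (an empty dict → IndexError on list(keys)[0]; a value
-- list shorter than the first key's → IndexError on v[ind]) and assoc lists with duplicate keys,
-- which a Python dict cannot contain, so they represent no Python input.
def Pre_partial_pack_for_risk (examples : List (String × List (List Int))) (max_len : Int) : Prop :=
  examples ≠ [] ∧ (examples.map Prod.fst).Nodup ∧
  ∀ kv ∈ examples, (examples.headD ("", [])).2.length ≤ kv.2.length
instance (examples : List (String × List (List Int))) (max_len : Int) : Decidable (Pre_partial_pack_for_risk examples max_len) := by unfold Pre_partial_pack_for_risk; infer_instance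

def pvWitness_partial_pack_for_risk : (List (String × List (List Int))) × Int :=
  ([("a", [[1], [2], [3]]), ("b", [[7], [8], [9]])], 2)

def Spec_partial_pack_for_risk (examples : List (String × List (List Int))) (max_len : Int) (out : List (String × List (List Int))) : Prop := out = partial_pack_for_risk_alt examples max_len
instance (examples : List (String × List (List Int))) (max_len : Int) (out : List (String × List (List Int))) : Decidable (Spec_partial_pack_for_risk examples max_len out) := by unfold Spec_partial_pack_for_risk; infer_instance

-- ===== CLAIM (what is proved, stated in full; the proofs are below) =====
def Claim_equal_partial_pack_for_risk : Prop := ∀ (examples : List (String × List (List Int))) (max_len : Int), Dom_partial_pack_for_risk examples max_len → Pre_partial_pack_for_risk examples max_len → Spec_partial_pack_for_risk examples max_len (partial_pack_for_risk examples max_len)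

-- ===== LEMMAS AND PROOFS =====

-- the trimmed slice at index i of value list v — the common quantity both ports compute per key/index
def pvTB (m : Int) (v : List (List Int)) (i : Int) : List Int :=
  pvTrimB m ((PySem.List.pyGet? v i).getD [])

-- the packed chunk for value list v over one bin of indices
def pvBinVal (m : Int) (v : List (List Int)) (b : List Int) : List Int :=
  (b.map (pvTB m v)).flatten

lemma pvGetD_mk_cons_self {β : Type} {k : String} {v : β} {rest : List (String × β)} {d : β} :
    PySem.Dict.getD ⟨(k, v) :: rest⟩ k d = v := by
  simp [PySem.Dict.getD, PySem.Dict.get?_mk_cons]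

lemma pvGetD_map_mem {β : Type} (F : String × List (List Int) → β) (d : β)
    (l : List (String × List (List Int))) (hnd : (l.map Prod.fst).Nodup) :
    ∀ kv ∈ l, PySem.Dict.getD (⟨l.map (fun kv' => (kv'.1, F kv'))⟩ : PySem.Dict String β) kv.1 d = F kv := by
  induction l with
  | nil => intro kv h; simp at h
  | cons a l ih =>
    intro kv h
    simp only [List.map_cons, List.nodup_cons] at hnd
    rcases List.mem_cons.mp h with rfl | hmem
    · exact pvGetD_mk_cons_self
    · have hne : a.1 ≠ kv.1 := by
        intro he; exact hnd.1 (he ▸ List.mem_map_of_mem hmem)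
      simp only [List.map_cons]
      rw [PySem.Dict.getD, PySem.Dict.get?_mk_cons]
      simp only [beq_iff_eq, hne, if_false]
      exact ih hnd.2 kv hmem

lemma pvGetD_map_head {β : Type} (F : String × List (List Int) → β) (d : β)
    (k₀ : String) (v₀ : List (List Int)) (t : List (String × List (List Int))) :
    PySem.Dict.getD (⟨((k₀, v₀) :: t).map (fun kv' => (kv'.1, F kv'))⟩ : PySem.Dict String β) k₀ d
      = F (k₀, v₀) := by
  simp only [List.map_cons]
  exact pvGetD_mk_cons_self

-- flushing new_example onto result is, per key, appending the current bin's chunk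
lemma pack_flush_eq (e : List (String × List (List Int))) (m : Int)
    (hnd : (e.map Prod.fst).Nodup) (bins : List (List Int)) (cur : List Int) :
    (e.map (fun kv => (kv.1, pvBinVal m kv.2 cur))).map
      (fun kv => (kv.1, (PySem.Dict.getD ⟨e.map (fun kv' => (kv'.1, bins.map (pvBinVal m kv'.2)))⟩ kv.1 []) ++ [kv.2]))
    = e.map (fun kv => (kv.1, (bins ++ [cur]).map (pvBinVal m kv.2))) := by
  rw [List.map_map]
  apply List.map_congr_left
  intro kv hkv
  simp only [Function.comp_apply]
  rw [pvGetD_map_mem (fun kv' => bins.map (pvBinVal m kv'.2)) [] e hnd kv hkv]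
  simp

-- extending new_example is, per key, extending the current bin by one index
lemma pack_extend_eq (e : List (String × List (List Int))) (m : Int)
    (hnd : (e.map Prod.fst).Nodup) (cur : List Int) (i : Int) :
    (e.map (fun kv => (kv.1, pvTrimA m kv.2 i))).map
      (fun kv => (kv.1, (PySem.Dict.getD ⟨e.map (fun kv' => (kv'.1, pvBinVal m kv'.2 cur))⟩ kv.1 []) ++ kv.2))
    = e.map (fun kv => (kv.1, pvBinVal m kv.2 (cur ++ [i]))) := by
  rw [List.map_map]
  apply List.map_congr_left
  intro kv hkv
  simp only [Function.comp_apply]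
  rw [pvGetD_map_mem (fun kv' => pvBinVal m kv'.2 cur) [] e hnd kv hkv]
  simp [pvBinVal, pvTB, pvTrimA, pvTrimB]

-- loop invariant: A's fold over the first j indices is the image of B's fold over the first j
-- enumerated elements, and B's running length is the length of the current chunk of the first key
lemma pack_loop (k₀ : String) (v₀ : List (List Int)) (t : List (String × List (List Int))) (m : Int)
    (hnd : ((((k₀, v₀) :: t).map Prod.fst)).Nodup) :
    ∀ j : Nat, j ≤ v₀.length →
    ((PySem.List.pyRange 0 (j : Int) 1).foldl
      (fun st ind =>
        let ex := ((k₀, v₀) :: t).map (fun kv => (kv.1, pvTrimA m kv.2 ind))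
        if ((PySem.Dict.getD ⟨st.2⟩ k₀ []).length : Int) + ((PySem.Dict.getD ⟨ex⟩ k₀ []).length : Int) > m then
          (st.2.map (fun kv => (kv.1, (PySem.Dict.getD ⟨st.1⟩ kv.1 []) ++ [kv.2])), ex)
        else
          (st.1, ex.map (fun kv => (kv.1, (PySem.Dict.getD ⟨st.2⟩ kv.1 []) ++ kv.2))))
      (((k₀, v₀) :: t).map (fun kv => (kv.1, ([] : List (List Int)))),
       ((k₀, v₀) :: t).map (fun kv => (kv.1, ([] : List Int)))))
    = (let sB := (PySem.List.enumerate (v₀.take j)).foldl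
        (fun (st : List (List Int) × List Int × Int) p =>
          if st.2.2 + ((pvTrimB m p.2).length : Int) > m then
            (st.1 ++ [st.2.1], [p.1], ((pvTrimB m p.2).length : Int))
          else (st.1, st.2.1 ++ [p.1], st.2.2 + ((pvTrimB m p.2).length : Int)))
        ([], [], 0)
       (((k₀, v₀) :: t).map (fun kv => (kv.1, sB.1.map (pvBinVal m kv.2))),
        ((k₀, v₀) :: t).map (fun kv => (kv.1, pvBinVal m kv.2 sB.2.1))))
    ∧ ((PySem.List.enumerate (v₀.take j)).foldl
        (fun (st : List (List Int) × List Int × Int) p =>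
          if st.2.2 + ((pvTrimB m p.2).length : Int) > m then
            (st.1 ++ [st.2.1], [p.1], ((pvTrimB m p.2).length : Int))
          else (st.1, st.2.1 ++ [p.1], st.2.2 + ((pvTrimB m p.2).length : Int)))
        ([], [], 0)).2.2
      = ((pvBinVal m v₀ ((PySem.List.enumerate (v₀.take j)).foldl
        (fun (st : List (List Int) × List Int × Int) p =>
          if st.2.2 + ((pvTrimB m p.2).length : Int) > m then
            (st.1 ++ [st.2.1], [p.1], ((pvTrimB m p.2).length : Int))
          else (st.1, st.2.1 ++ [p.1], st.2.2 + ((pvTrimB m p.2).length : Int)))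
        ([], [], 0)).2.1).length : Int) := by
  intro j
  induction j with
  | zero =>
    intro _
    constructor
    · simp [pvBinVal]
    · simp
  | succ j ih =>
    intro hj
    have hj' : j ≤ v₀.length := by omega
    have hjlt : j < v₀.length := by omega
    obtain ⟨ih1, ih2⟩ := ih hj'
    have hr : PySem.List.pyRange 0 ((j + 1 : Nat) : Int) 1 = PySem.List.pyRange 0 (j : Int) 1 ++ [(j : Int)] := by
      push_cast
      exact PySem.List.pyRange_one_succ_right (by positivity)
    have ht : v₀.take (j + 1) = v₀.take j ++ [v₀[j]] := by
      rw [List.take_add_one]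
      simp [List.getElem?_eq_getElem hjlt]
    have hlen : (v₀.take j).length = j := by simp [hjlt.le]
    have hTB : pvTB m v₀ (j : Int) = pvTrimB m v₀[j] := by
      simp [pvTB, PySem.List.pyGet?_natCast, List.getElem?_eq_getElem hjlt]
    have hTA : pvTrimA m v₀ (j : Int) = pvTrimB m v₀[j] := hTB
    rw [hr, ht, List.foldl_append, PySem.List.enumerate_append, List.foldl_append,
        PySem.List.enumerate_cons, PySem.List.enumerate_nil, hlen]
    set sB := (PySem.List.enumerate (v₀.take j)).foldl
        (fun (st : List (List Int) × List Int × Int) p =>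
          if st.2.2 + ((pvTrimB m p.2).length : Int) > m then
            (st.1 ++ [st.2.1], [p.1], ((pvTrimB m p.2).length : Int))
          else (st.1, st.2.1 ++ [p.1], st.2.2 + ((pvTrimB m p.2).length : Int)))
        ([], [], 0) with hsB
    rw [ih1]
    clear_value sB
    obtain ⟨bins, cur, clen⟩ := sB
    simp only at ih2 ⊢
    rw [ih2]
    simp only [List.foldl_cons, List.foldl_nil, pvGetD_map_head, hTA, zero_add]
    by_cases hc : ((pvBinVal m v₀ cur).length : Int) + ((pvTrimB m v₀[j]).length : Int) > m
    · simp only [if_pos hc]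
      refine ⟨Prod.ext ?_ ?_, ?_⟩
      · exact pack_flush_eq ((k₀, v₀) :: t) m hnd bins cur
      · simp [pvBinVal, pvTB, pvTrimA, pvTrimB]
      · simp [pvBinVal, hTB]
    · simp only [if_neg hc]
      refine ⟨Prod.ext rfl ?_, ?_⟩
      · exact pack_extend_eq ((k₀, v₀) :: t) m hnd cur (j : Int)
      · simp [pvBinVal, List.map_append, hTB]

theorem pack_main (examples : List (String × List (List Int))) (max_len : Int)
    (hne : examples ≠ []) (hnd : (examples.map Prod.fst).Nodup) :
    partial_pack_for_risk examples max_len = partial_pack_for_risk_alt examples max_len := by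
  cases examples with
  | nil => exact absurd rfl hne
  | cons kv t =>
  obtain ⟨k₀, v₀⟩ := kv
  have hkey : ((((k₀, v₀) :: t).map Prod.fst).headD "") = k₀ := by simp
  have hn : PySem.Dict.getD (⟨(k₀, v₀) :: t⟩ : PySem.Dict String (List (List Int))) k₀ [] = v₀ :=
    pvGetD_mk_cons_self
  simp only [partial_pack_for_risk, partial_pack_for_risk_alt, hkey, List.headD_cons, hn]
  obtain ⟨h1, h2⟩ := pack_loop k₀ v₀ t max_len hnd v₀.length le_rfl
  rw [List.take_length] at h1 h2
  rw [h1, h2]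
  set sB := (PySem.List.enumerate v₀).foldl
        (fun (st : List (List Int) × List Int × Int) p =>
          if st.2.2 + ((pvTrimB max_len p.2).length : Int) > max_len then
            (st.1 ++ [st.2.1], [p.1], ((pvTrimB max_len p.2).length : Int))
          else (st.1, st.2.1 ++ [p.1], st.2.2 + ((pvTrimB max_len p.2).length : Int)))
        ([], [], 0) with hsB
  clear_value sB
  obtain ⟨bins, cur, clen⟩ := sB
  simp only [pvGetD_map_head]
  by_cases hc : ((pvBinVal max_len v₀ cur).length : Int) > 0
  · simp only [if_pos hc]
    rw [pack_flush_eq ((k₀, v₀) :: t) max_len hnd bins cur]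
    rfl
  · simp only [if_neg hc]
    rfl

-- ===== VERDICT (by name: the statement is the Claim_ definition above) =====
theorem partial_pack_for_risk_spec : Claim_equal_partial_pack_for_risk := by
  intro examples max_len _ hpre
  unfold Spec_partial_pack_for_risk
  exact pack_main examples max_len hpre.1 hpre.2.1
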